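-- pv_equiv track=rewrite | github.com/paltis5212/RandomMIDI | RandomMIDI/DetailProcess.py | getScaleAndTempo
-- ===== SOURCE A (Python) =====
-- def getScaleAndTempo(noteStr: str):
--     """ 完整音符文字中，取得音階和節拍 """
--     index = 0
--     for strIndex in range(len(noteStr)):
--         str = noteStr[strIndex]
--         if str.isdigit() or str == "'" or str == ",":
--             index = strIndex + 1
--     return {
--         "scale": noteStr[: index],
--         "tempo": noteStr[index:]
--     }
-- ===== SOURCE B (Python) =====
-- def getScaleAndTempo(noteStr: str):
--     """ 完整音符文字中，取得音階和節拍 """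
--     chars = []
--     for c in reversed(noteStr):
--         if c.isdigit() or c == "'" or c == ",":
--             break
--         chars.append(c)
--     tempo = "".join(reversed(chars))
--     return {
--         "scale": noteStr[: len(noteStr) - len(tempo)],
--         "tempo": tempo
--     }
-- ===== Notes on version B (the rewrite author's own statement) =====
-- stated objective: alternative
-- what changed: Instead of A's forward full pass maintaining a last-marker index and slicing twice, B collects the non-marker characters from the end of the string into a list (breaking at the first marker), joins them into the tempo string, and slices only the scale off by its length.
import Mathlib
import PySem

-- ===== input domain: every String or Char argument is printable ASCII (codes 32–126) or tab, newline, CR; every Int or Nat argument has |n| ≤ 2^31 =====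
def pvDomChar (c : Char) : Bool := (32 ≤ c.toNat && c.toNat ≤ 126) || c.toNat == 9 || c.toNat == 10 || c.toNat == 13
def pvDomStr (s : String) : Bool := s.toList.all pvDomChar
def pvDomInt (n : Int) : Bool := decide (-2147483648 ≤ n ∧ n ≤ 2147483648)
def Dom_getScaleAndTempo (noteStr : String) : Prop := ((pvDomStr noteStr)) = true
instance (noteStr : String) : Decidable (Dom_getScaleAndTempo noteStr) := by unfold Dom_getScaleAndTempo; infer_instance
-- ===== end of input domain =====

-- B collects the non-marker characters from the end of the string into a list, breaking at the
-- first marker ('0'-'9', '\'', ','), joins them into the tempo string and slices only the scale.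
-- Same return value; alternative decomposition (suffix collection instead of a marker index).

-- the condition "c.isdigit() or c == \"'\" or c == \",\"" (one Python char)
def pvIsMark (c : Char) : Bool := PySem.Chars.isdigit c || c == '\'' || c == ','

-- ===== PORT A =====
-- A's forward loop: idx carries the running value of `index`, i the current position
def pvLoopA : List Char → Nat → Nat → Nat
  | [], _, idx => idx
  | c :: rest, i, idx => pvLoopA rest (i + 1) (if pvIsMark c then i + 1 else idx)

def getScaleAndTempo (noteStr : String) : List (String × String) :=
  let l := noteStr.toList
  let index := pvLoopA l 0 0
  -- noteStr[:index] / noteStr[index:] with 0 ≤ index ≤ len are exactly take/drop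
  [("scale", String.ofList (l.take index)), ("tempo", String.ofList (l.drop index))]

-- ===== PORT B =====
-- B's loop over reversed(noteStr): `chars.append(c)` collects until the first marker (`break`)
def pvCollect : List Char → List Char
  | [] => []
  | c :: rest => if pvIsMark c then [] else c :: pvCollect rest

def getScaleAndTempo_alt (noteStr : String) : List (String × String) :=
  -- ''.join(reversed(chars))
  let tempo := (pvCollect noteStr.toList.reverse).reverse
  -- noteStr[: len(noteStr) - len(tempo)]
  let scale := noteStr.toList.take (noteStr.toList.length - tempo.length)
  [("scale", String.ofList scale), ("tempo", String.ofList tempo)]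

-- ===== PRECONDITION & SPEC =====
def Spec_getScaleAndTempo (noteStr : String) (out : List (String × String)) : Prop := out = getScaleAndTempo_alt noteStr
instance (noteStr : String) (out : List (String × String)) : Decidable (Spec_getScaleAndTempo noteStr out) := by unfold Spec_getScaleAndTempo; infer_instance

-- ===== CLAIM (what is proved, stated in full; the proofs are below) =====
def Claim_equal_getScaleAndTempo : Prop := ∀ (noteStr : String), Dom_getScaleAndTempo noteStr → Spec_getScaleAndTempo noteStr (getScaleAndTempo noteStr)

-- ===== LEMMAS AND PROOFS =====

-- B's collection loop computes the maximal non-marker prefix of its input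
theorem pvCollect_eq (l : List Char) :
    pvCollect l = l.takeWhile (fun c => !pvIsMark c) := by
  induction l with
  | nil => simp [pvCollect]
  | cons c rest ih =>
      by_cases h : pvIsMark c = true <;>
        simp [pvCollect, List.takeWhile_cons, h, ih]

-- appending one char on the right: A's loop returns that position+1 if it is a marker
theorem pvLoopA_append (l : List Char) (c : Char) :
    ∀ i idx, pvLoopA (l ++ [c]) i idx =
      if pvIsMark c then i + l.length + 1 else pvLoopA l i idx := by
  induction l with
  | nil => intro i idx; simp [pvLoopA]
  | cons d rest ih =>
      intro i idx
      simp only [List.cons_append, pvLoopA, ih, List.length_cons]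
      split <;> omega

-- A's index is the length of the string minus the length of its maximal non-marker suffix
theorem pvLoopA_eq (l : List Char) :
    pvLoopA l 0 0 = l.length - (l.reverse.takeWhile (fun c => !pvIsMark c)).length := by
  induction l using List.reverseRecOn with
  | nil => rfl
  | append_singleton rest c ih =>
      rw [pvLoopA_append, List.reverse_append, List.reverse_singleton, List.singleton_append,
        List.takeWhile_cons]
      by_cases h : pvIsMark c = true
      · simp [h]
      · simp [h, ih]

-- ===== VERDICT (by name: the statement is the Claim_ definition above) =====
theorem getScaleAndTempo_spec : Claim_equal_getScaleAndTempo := by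
  intro noteStr _
  unfold Spec_getScaleAndTempo getScaleAndTempo getScaleAndTempo_alt
  simp only [pvCollect_eq, List.length_reverse, pvLoopA_eq]
  -- decompose the char list as d.reverse ++ t.reverse where t is the non-marker suffix (reversed)
  set l := noteStr.toList with hl
  set t := l.reverse.takeWhile (fun c => !pvIsMark c) with ht
  set d := l.reverse.dropWhile (fun c => !pvIsMark c) with hd
  have hsplit : l = d.reverse ++ t.reverse := by
    have : l.reverse = t ++ d := (List.takeWhile_append_dropWhile).symm
    calc l = l.reverse.reverse := (List.reverse_reverse l).symm
      _ = (t ++ d).reverse := by rw [this]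
      _ = d.reverse ++ t.reverse := by simp
  have hlen : l.length - t.length = d.reverse.length := by
    have : l.length = d.reverse.length + t.reverse.length := by
      rw [hsplit]; simp
    simp only [List.length_reverse] at this ⊢; omega
  rw [hlen, hsplit, List.take_left, List.drop_left]
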